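-- pv_equiv track=rewrite | github.com/Chants77/Persona-Identification-in-Movie-Summaries | data_preprocessing/data_washer.py | choose_categories
-- ===== SOURCE A (Python) =====
-- from collections import Counter, defaultdict
-- from typing import List, Dict
--
-- Record = Dict[str, str]
--
-- def choose_categories(records: List[Record], category_counts: Counter) -> Dict[str, str]:
--     id_to_category: Dict[str, str] = {}
--
--     for rec in records:
--         cid, cat = rec["id"], rec["category"]
--
--         if cid not in id_to_category:
--             id_to_category[cid] = cat
--             continue
--
--         current = id_to_category[cid]
--         if category_counts[cat] > category_counts[current]:
--             id_to_category[cid] = cat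
--
--     return id_to_category
-- ===== SOURCE B (Python) =====
-- def choose_categories(records, category_counts):
--     # Two-pass: group categories by id (insertion order), then pick each group's
--     # winner with max(), whose first-maximal rule reproduces A's first-wins
--     # tie-break. Counter lookups (missing key = 0) are written as .get(c, 0).
--     groups = {}
--     for rec in records:
--         groups.setdefault(rec["id"], []).append(rec["category"])
--     return {cid: max(cats, key=lambda c: category_counts.get(c, 0))
--             for cid, cats in groups.items()}
-- ===== Notes on version B (the rewrite author's own statement) =====
-- stated objective: simpler
-- what changed: Replaces A's incremental running-best dict update with a two-pass decomposition: first group categories per id in insertion order, then pick each group's winner with max(key=count), whose first-maximal rule gives A's first-wins tie-break.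
import Mathlib
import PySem

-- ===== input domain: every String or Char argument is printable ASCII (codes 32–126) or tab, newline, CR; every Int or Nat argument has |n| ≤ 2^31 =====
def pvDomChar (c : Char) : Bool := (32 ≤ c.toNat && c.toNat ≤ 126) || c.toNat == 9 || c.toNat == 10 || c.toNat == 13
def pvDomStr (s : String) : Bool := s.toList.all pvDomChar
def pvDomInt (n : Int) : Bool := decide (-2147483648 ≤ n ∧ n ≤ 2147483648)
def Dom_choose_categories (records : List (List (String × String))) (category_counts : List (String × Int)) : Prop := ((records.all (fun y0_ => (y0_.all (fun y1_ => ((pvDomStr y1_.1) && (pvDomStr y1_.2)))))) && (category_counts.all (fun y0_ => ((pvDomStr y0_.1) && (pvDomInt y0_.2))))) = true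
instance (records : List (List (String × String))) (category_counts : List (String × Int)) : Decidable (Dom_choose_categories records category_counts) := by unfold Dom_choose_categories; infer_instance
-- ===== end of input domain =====

-- B replaces A's incremental running-best dict update with a two-pass decomposition
-- (group categories per id, then pick each group's winner with max(key=count)); objective: simpler.


-- ===== PORT A =====
-- rec["k"] on a record (assoc list) is first-match lookup; Pre_ guarantees both keys
-- are present, so the `| _, _ => d` skip branch (Python: KeyError) is unreachable.
-- category_counts is a Counter: lookup of a missing key is 0, ported as getD _ 0.
def choose_categories (records : List (List (String × String))) (category_counts : List (String × Int)) : List (String × String) :=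
  (records.foldl (fun (d : PySem.Dict String String) rec =>
      match (PySem.Dict.mk rec).get? "id", (PySem.Dict.mk rec).get? "category" with
      | some cid, some cat =>
        match d.get? cid with
        | none => d.insert cid cat
        | some current =>
          if (PySem.Dict.mk category_counts).getD cat 0 > (PySem.Dict.mk category_counts).getD current 0
          then d.insert cid cat else d
      | _, _ => d)
    PySem.Dict.empty).items

-- ===== PORT B =====
-- rec["id"], rec["category"] for B's grouping pass (none = KeyError, unreachable under Pre_)
def pvGetIdCat (rec : List (String × String)) : Option (String × String) :=
  ((PySem.Dict.mk rec).get? "id").bind fun cid =>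
    ((PySem.Dict.mk rec).get? "category").map fun cat => (cid, cat)

-- groups.setdefault(cid, []).append(cat)  =  modify cid [] (· ++ [cat]).
-- Every group list is nonempty, so max? is always some; getD's "" is never used.
def choose_categories_alt (records : List (List (String × String))) (category_counts : List (String × Int)) : List (String × String) :=
  let groups : PySem.Dict String (List String) :=
    records.foldl (fun g rec =>
      match pvGetIdCat rec with
      | some (cid, cat) => g.modify cid [] (· ++ [cat])
      | none => g)
    PySem.Dict.empty
  groups.items.map (fun p =>
    (p.1, (PySem.List.max? p.2 (fun c => (PySem.Dict.mk category_counts).getD c 0)).getD ""))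

-- ===== PRECONDITION & SPEC =====
-- Pre_: every record has both keys "id" and "category" — Python A raises KeyError on
-- rec["id"]/rec["category"] otherwise. Counter lookups never raise (missing key = 0),
-- so nothing else is excluded.
def Pre_choose_categories (records : List (List (String × String))) (category_counts : List (String × Int)) : Prop :=
  ∀ rec ∈ records, ((PySem.Dict.mk rec).get? "id").isSome ∧ ((PySem.Dict.mk rec).get? "category").isSome
instance (records : List (List (String × String))) (category_counts : List (String × Int)) : Decidable (Pre_choose_categories records category_counts) := by unfold Pre_choose_categories; infer_instance
def pvWitness_choose_categories : (List (List (String × String))) × (List (String × Int)) :=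
  ([[("id", "a"), ("category", "x")], [("id", "a"), ("category", "y")]], [("x", 2), ("y", 3)])


def Spec_choose_categories (records : List (List (String × String))) (category_counts : List (String × Int)) (out : List (String × String)) : Prop := out = choose_categories_alt records category_counts
instance (records : List (List (String × String))) (category_counts : List (String × Int)) (out : List (String × String)) : Decidable (Spec_choose_categories records category_counts out) := by unfold Spec_choose_categories; infer_instance

-- ===== CLAIM (what is proved, stated in full; the proofs are below) =====
def Claim_equal_choose_categories : Prop := ∀ (records : List (List (String × String))) (category_counts : List (String × Int)), Dom_choose_categories records category_counts → Pre_choose_categories records category_counts → Spec_choose_categories records category_counts (choose_categories records category_counts)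

-- ===== LEMMAS AND PROOFS =====

-- A's running best over a nonempty category list ([]: unused sentinel)
def pvPick (cnt : String → Int) : List String → String
  | [] => ""
  | c :: rest => rest.foldl (fun b x => if cnt b < cnt x then x else b) c

theorem pvPick_singleton (cnt : String → Int) (c : String) : pvPick cnt [c] = c := rfl

theorem pvPick_concat (cnt : String → Int) (c : String) (rest : List String) (cat : String) :
    pvPick cnt (c :: (rest ++ [cat])) =
      (if cnt (pvPick cnt (c :: rest)) < cnt cat then cat else pvPick cnt (c :: rest)) := by
  simp [pvPick, List.foldl_append]

theorem pvMax?_cons (cnt : String → Int) (c : String) (rest : List String) :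
    PySem.List.max? (c :: rest) cnt = some (pvPick cnt (c :: rest)) := by
  induction rest generalizing c with
  | nil => rfl
  | cons y ys ih =>
    have h1 : PySem.List.max? (c :: y :: ys) cnt
        = PySem.List.max? ((if cnt c < cnt y then y else c) :: ys) cnt := by
      by_cases h : cnt c < cnt y <;> simp [PySem.List.max?, h]
    have h2 : pvPick cnt (c :: y :: ys) = pvPick cnt ((if cnt c < cnt y then y else c) :: ys) := by
      by_cases h : cnt c < cnt y <;> simp [pvPick, h]
    rw [h1, h2, ih]

theorem pvMax?_eq_pick (cnt : String → Int) (cats : List String) (h : cats ≠ []) :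
    (PySem.List.max? cats cnt).getD "" = pvPick cnt cats := by
  match cats with
  | [] => exact absurd rfl h
  | c :: rest => rw [pvMax?_cons]; rfl

def pvMapPick (cnt : String → Int) (gd : PySem.Dict String (List String)) : PySem.Dict String String :=
  PySem.Dict.mk (gd.items.map (fun p => (p.1, pvPick cnt p.2)))

theorem pvGet?_mapPick (cnt : String → Int) (its : List (String × List String)) (k : String) :
    (PySem.Dict.mk (its.map (fun p => (p.1, pvPick cnt p.2)))).get? k
      = ((PySem.Dict.mk its).get? k).map (pvPick cnt) := by
  induction its with
  | nil => rfl
  | cons p rest ih =>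
    by_cases h : p.1 == k
    · simp [PySem.Dict.get?, List.find?, h]
    · simp [PySem.Dict.get?, List.find?, h] at ih ⊢
      simpa using ih

theorem pvContains_mapPick (cnt : String → Int) (gd : PySem.Dict String (List String)) (k : String) :
    (pvMapPick cnt gd).contains k = gd.contains k := by
  rw [PySem.Dict.contains_eq_isSome_get?, PySem.Dict.contains_eq_isSome_get?]
  simp [pvMapPick, pvGet?_mapPick]

-- the single-step commutation: A's update on the mapped dict = picking after grouping one more pair
theorem pvStep_eq (cnt : String → Int) (gd : PySem.Dict String (List String))
    (hnd : gd.keys.Nodup) (hne : ∀ p ∈ gd.items, p.2 ≠ []) (cid cat : String) :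
    (match (pvMapPick cnt gd).get? cid with
      | none => (pvMapPick cnt gd).insert cid cat
      | some current => if cnt cat > cnt current then (pvMapPick cnt gd).insert cid cat else pvMapPick cnt gd)
      = pvMapPick cnt (gd.modify cid [] (· ++ [cat])) := by
  have hget : (pvMapPick cnt gd).get? cid = (gd.get? cid).map (pvPick cnt) := pvGet?_mapPick ..
  rcases hcase : gd.get? cid with _ | cats
  · -- new id
    have hc : gd.contains cid = false := by
      rw [PySem.Dict.contains_eq_isSome_get?, hcase]; rfl
    have hc' : (pvMapPick cnt gd).contains cid = false := by rw [pvContains_mapPick, hc]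
    have hgd : gd.getD cid [] = [] := by rw [PySem.Dict.getD_eq_get?_getD, hcase]; rfl
    rw [hget, hcase]
    simp only [Option.map_none]
    rw [PySem.Dict.modify, hgd]
    apply PySem.Dict.ext
    simp only [pvMapPick] at hc' ⊢
    rw [PySem.Dict.items_insert_of_not_contains _ _ hc',
        PySem.Dict.items_insert_of_not_contains _ _ hc]
    simp [pvPick_singleton]
  · -- existing id
    have hc : gd.contains cid = true := by
      rw [PySem.Dict.contains_eq_isSome_get?, hcase]; rfl
    have hc' : (pvMapPick cnt gd).contains cid = true := by rw [pvContains_mapPick, hc]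
    have hmem : (cid, cats) ∈ gd.items := PySem.Dict.mem_items_of_get?_eq_some _ hcase
    have hcats : cats ≠ [] := hne _ hmem
    have hgd : gd.getD cid [] = cats := by rw [PySem.Dict.getD_eq_get?_getD, hcase]; rfl
    obtain ⟨c, rest, rfl⟩ : ∃ c rest, cats = c :: rest := by
      cases cats with
      | nil => exact absurd rfl hcats
      | cons c rest => exact ⟨c, rest, rfl⟩
    rw [hget, hcase]
    simp only [Option.map_some]
    rw [PySem.Dict.modify, hgd]
    apply PySem.Dict.ext
    have hi := PySem.Dict.items_insert_of_contains (k := cid) gd (c :: rest ++ [cat]) hc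
    have hrepl : ∀ p ∈ gd.items, p.1 == cid → p = (cid, c :: rest) := by
      intro p hp hpk
      obtain ⟨a, b⟩ := p
      have hk : a = cid := by simpa using hpk
      have h2 := PySem.Dict.get?_of_mem_items _ (show (cid, b) ∈ gd.items from hk ▸ hp) hnd
      rw [hcase] at h2
      simp_all
    by_cases hlt : cnt (pvPick cnt (c :: rest)) < cnt cat
    · have : cnt cat > cnt (pvPick cnt (c :: rest)) := hlt
      rw [if_pos this]
      simp only [pvMapPick] at hc' ⊢
      rw [PySem.Dict.items_insert_of_contains _ _ hc', hi]
      simp only [List.map_map]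
      apply List.map_congr_left
      intro p hp
      by_cases hpk : p.1 == cid
      · have hpe := hrepl p hp hpk
        simp [hpe, pvPick_concat, hlt]
      · simp [show p.1 ≠ cid by simpa using hpk]
    · rw [if_neg (by simpa using hlt)]
      simp only [pvMapPick] at hc' ⊢
      rw [hi]
      simp only [List.map_map]
      symm
      apply List.map_congr_left
      intro p hp
      by_cases hpk : p.1 == cid
      · have hpe := hrepl p hp hpk
        simp [hpe, pvPick_concat, hlt]
      · simp [show p.1 ≠ cid by simpa using hpk]

-- invariants of the grouping step
theorem pvNe_modify (gd : PySem.Dict String (List String))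
    (hne : ∀ p ∈ gd.items, p.2 ≠ []) (cid cat : String) :
    ∀ p ∈ (gd.modify cid [] (· ++ [cat])).items, p.2 ≠ [] := by
  intro p hp
  rw [PySem.Dict.modify] at hp
  by_cases hc : gd.contains cid
  · rw [PySem.Dict.items_insert_of_contains _ _ hc] at hp
    obtain ⟨q, hq, hqe⟩ := List.mem_map.mp hp
    by_cases hk : q.1 == cid
    · rw [if_pos hk] at hqe; subst hqe; simp
    · rw [if_neg hk] at hqe; subst hqe; exact hne q hq
  · rw [PySem.Dict.items_insert_of_not_contains _ _ (by simpa using hc)] at hp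
    rcases List.mem_append.mp hp with h | h
    · exact hne p h
    · simp at h; subst h; simp

-- main invariant: A's fold on the mapped dict = map-pick of B's grouping fold
theorem pvMain (cnt : String → Int) (records : List (List (String × String)))
    (gd : PySem.Dict String (List String)) (hnd : gd.keys.Nodup)
    (hne : ∀ p ∈ gd.items, p.2 ≠ []) :
    records.foldl (fun (d : PySem.Dict String String) rec =>
      match (PySem.Dict.mk rec).get? "id", (PySem.Dict.mk rec).get? "category" with
      | some cid, some cat =>
        match d.get? cid with
        | none => d.insert cid cat
        | some current => if cnt cat > cnt current then d.insert cid cat else d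
      | _, _ => d) (pvMapPick cnt gd)
    = pvMapPick cnt (records.foldl (fun g rec =>
      match pvGetIdCat rec with
      | some (cid, cat) => g.modify cid [] (· ++ [cat])
      | none => g) gd) := by
  induction records generalizing gd with
  | nil => rfl
  | cons rec rest ih =>
    simp only [List.foldl_cons]
    rcases h1 : (PySem.Dict.mk rec).get? "id" with _ | cid
    · simp only [pvGetIdCat, h1]
      exact ih gd hnd hne
    rcases h2 : (PySem.Dict.mk rec).get? "category" with _ | cat
    · simp only [pvGetIdCat, h1, h2]
      exact ih gd hnd hne
    simp only [pvGetIdCat, h1, h2]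
    rw [pvStep_eq cnt gd hnd hne cid cat]
    exact ih _ (by rw [PySem.Dict.modify]; exact PySem.Dict.nodup_keys_insert _ _ _ hnd)
      (pvNe_modify gd hne cid cat)

theorem pvNe_fold (records : List (List (String × String))) :
    ∀ p ∈ (records.foldl (fun (g : PySem.Dict String (List String)) rec =>
      match pvGetIdCat rec with
      | some (cid, cat) => g.modify cid [] (· ++ [cat])
      | none => g) PySem.Dict.empty).items, p.2 ≠ [] := by
  suffices h : ∀ (gd : PySem.Dict String (List String)), (∀ p ∈ gd.items, p.2 ≠ []) →
      ∀ p ∈ (records.foldl (fun g rec =>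
        match pvGetIdCat rec with
        | some (cid, cat) => g.modify cid [] (· ++ [cat])
        | none => g) gd).items, p.2 ≠ [] by
    exact h PySem.Dict.empty (by intro p hp; simp [PySem.Dict.empty] at hp)
  induction records with
  | nil => intro gd hne; exact hne
  | cons rec rest ih =>
    intro gd hne
    simp only [List.foldl_cons]
    rcases pvGetIdCat rec with _ | ⟨cid, cat⟩
    · exact ih gd hne
    exact ih _ (pvNe_modify gd hne cid cat)

-- ===== VERDICT (by name: the statement is the Claim_ definition above) =====
theorem choose_categories_spec : Claim_equal_choose_categories := by
  intro records category_counts _dom _pre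
  unfold Spec_choose_categories choose_categories choose_categories_alt
  have h := pvMain (fun c => (PySem.Dict.mk category_counts).getD c 0) records PySem.Dict.empty
    (by simp [PySem.Dict.keys, PySem.Dict.empty]) (by intro p hp; simp [PySem.Dict.empty] at hp)
  have hempty : pvMapPick (fun c => (PySem.Dict.mk category_counts).getD c 0) PySem.Dict.empty = PySem.Dict.empty := rfl
  rw [hempty] at h
  rw [h]
  simp only [pvMapPick]
  apply List.map_congr_left
  intro p hp
  rw [pvMax?_eq_pick _ _ (pvNe_fold records p hp)]
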